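-- pv_equiv track=rewrite | github.com/jasonacox/tinytuya | regression/regression_test.py | get_version_summary
-- ===== SOURCE A (Python) =====
-- from typing import List, Dict, Any, Tuple
--
-- def get_version_summary(devices: List[Dict[str, Any]]) -> Dict[str, List[Dict[str, Any]]]:
--     """Get a summary of devices grouped by version"""
--     versions = {}
--     for device in devices:
--         ver = device.get('version', device.get('ver', '3.3'))
--         if ver not in versions:
--             versions[ver] = []
--         versions[ver].append(device)
--     return versions
-- ===== SOURCE B (Python) =====
-- def get_version_summary(devices):
--     """Get a summary of devices grouped by version"""
--     def key(d):
--         return d.get('version', d.get('ver', '3.3'))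
--     keys = list(dict.fromkeys(key(d) for d in devices))
--     return {k: [d for d in devices if key(d) == k] for k in keys}
-- ===== Notes on version B (the rewrite author's own statement) =====
-- stated objective: alternative
-- what changed: A builds a dict of lists in one pass, appending each device to its version's bucket as it goes; B first computes the distinct version keys in first-seen order (dict.fromkeys dedup) and then builds each group with one filter pass over the device list per key.
import Mathlib
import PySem

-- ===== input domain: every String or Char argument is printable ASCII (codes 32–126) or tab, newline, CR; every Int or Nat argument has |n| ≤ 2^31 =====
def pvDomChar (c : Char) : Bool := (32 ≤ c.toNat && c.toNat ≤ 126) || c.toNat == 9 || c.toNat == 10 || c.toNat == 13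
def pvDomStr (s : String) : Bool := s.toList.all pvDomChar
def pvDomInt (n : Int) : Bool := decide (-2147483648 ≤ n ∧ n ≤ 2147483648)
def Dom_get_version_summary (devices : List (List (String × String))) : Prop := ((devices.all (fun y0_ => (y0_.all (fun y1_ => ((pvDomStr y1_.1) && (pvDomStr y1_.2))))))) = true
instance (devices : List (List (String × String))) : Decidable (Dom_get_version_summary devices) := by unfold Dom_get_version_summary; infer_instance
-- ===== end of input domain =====

-- B replaces A's one-pass dict-of-lists accumulation by a two-pass decomposition
-- (dedup the version keys in first-seen order, then filter the device list once per key);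
-- objective: alternative structure, same output.

-- shared key computation: device.get('version', device.get('ver', '3.3'))
def devKey (device : List (String × String)) : String :=
  PySem.Dict.getD (PySem.Dict.mk device) "version"
    (PySem.Dict.getD (PySem.Dict.mk device) "ver" "3.3")

-- ===== PORT A =====
def get_version_summary (devices : List (List (String × String))) : List (String × List (List (String × String))) :=
  let versions : PySem.Dict String (List (List (String × String))) :=
    devices.foldl (fun versions device =>
      let ver := devKey device
      let versions := if versions.contains ver then versions
                      else versions.insert ver ([] : List (List (String × String)))
      versions.modify ver [] (fun l => l ++ [device])) PySem.Dict.empty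
  versions.items

-- ===== PORT B =====
def get_version_summary_alt (devices : List (List (String × String))) : List (String × List (List (String × String))) :=
  let keys := PySem.List.dedup (devices.map devKey)
  keys.map (fun k => (k, devices.filter (fun d => devKey d == k)))

-- ===== PRECONDITION & SPEC =====
def Spec_get_version_summary (devices : List (List (String × String))) (out : List (String × List (List (String × String)))) : Prop := out = get_version_summary_alt devices
instance (devices : List (List (String × String))) (out : List (String × List (List (String × String)))) : Decidable (Spec_get_version_summary devices out) := by unfold Spec_get_version_summary; infer_instance

-- ===== CLAIM (what is proved, stated in full; the proofs are below) =====
def Claim_equal_get_version_summary : Prop := ∀ (devices : List (List (String × String))), Dom_get_version_summary devices → Spec_get_version_summary devices (get_version_summary devices)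

-- ===== LEMMAS AND PROOFS =====

-- inserting a key fresh in d and then overwriting it is a single insert
theorem insert_insert_of_not_contains {κ ν : Type} [BEq κ] [LawfulBEq κ]
    (d : PySem.Dict κ ν) (k : κ) (v w : ν) (h : d.contains k = false) :
    (d.insert k v).insert k w = d.insert k w := by
  apply PySem.Dict.ext
  rw [PySem.Dict.items_insert_of_contains _ w (by
        rw [PySem.Dict.contains_insert]; simp),
      PySem.Dict.items_insert_of_not_contains _ v h,
      PySem.Dict.items_insert_of_not_contains _ w h]
  have hne : ∀ p ∈ d.items, p.1 ≠ k := by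
    intro p hp hpk
    have : d.contains k = true := by
      rw [PySem.Dict.contains_iff_mem_keys]
      exact hpk ▸ PySem.Dict.mem_keys_of_mem_items d hp
    simp [this] at h
  rw [List.map_append]
  congr 1
  · exact (List.map_congr_left (fun p hp => by simp [hne p hp])).trans (List.map_id _)
  · simp

-- A's loop body is exactly a `modify` step
theorem stepA_eq_modify (d : PySem.Dict String (List (List (String × String))))
    (x : List (String × String)) :
    (let ver := devKey x
     let d' := if d.contains ver then d else d.insert ver ([] : List (List (String × String)))
     d'.modify ver [] (fun l => l ++ [x])) = d.modify (devKey x) [] (fun l => l ++ [x]) := by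
  by_cases h : d.contains (devKey x) = true
  · simp only [h, if_true]
  · simp only [Bool.not_eq_true] at h
    simp only [h, Bool.false_eq_true, if_false]
    unfold PySem.Dict.modify
    rw [PySem.Dict.getD_insert_self, insert_insert_of_not_contains _ _ _ _ h,
        PySem.Dict.getD_of_not_contains _ _ h]

theorem foldlA_eq_foldl_modify (l : List (List (String × String)))
    (d : PySem.Dict String (List (List (String × String)))) :
    l.foldl (fun versions device =>
      let ver := devKey device
      let versions := if versions.contains ver then versions
                      else versions.insert ver ([] : List (List (String × String)))
      versions.modify ver [] (fun l => l ++ [device])) d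
    = l.foldl (fun d x => d.modify (devKey x) [] (fun l => l ++ [x])) d := by
  simp only [stepA_eq_modify]

-- a dict with nodup keys is determined by its keys and lookups
theorem items_eq_keys_map {κ ν : Type} [BEq κ] [LawfulBEq κ]
    (d : PySem.Dict κ ν) (d0 : ν) (h : d.keys.Nodup) :
    d.items = d.keys.map (fun k => (k, d.getD k d0)) := by
  have hk : d.keys = d.items.map (·.1) := by simp only [PySem.Dict.keys]
  rw [hk, List.map_map]
  have : ∀ p ∈ d.items, ((fun k => (k, d.getD k d0)) ∘ (·.1)) p = p := by
    intro p hp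
    have := PySem.Dict.getD_of_mem_items d (k := p.1) (v := p.2) (by simpa using hp) h d0
    simp [this]
  rw [List.map_congr_left this]
  simp

theorem main_eq (devices : List (List (String × String))) :
    get_version_summary devices = get_version_summary_alt devices := by
  unfold get_version_summary get_version_summary_alt
  rw [foldlA_eq_foldl_modify]
  set D := devices.foldl (fun d x => d.modify (devKey x) [] (fun l => l ++ [x])) PySem.Dict.empty with hD
  have hkeys : D.keys = PySem.List.dedup (devices.map devKey) := by
    rw [hD, PySem.Dict.keys_foldl_modify_key devices devKey [] (fun _ x => fun l => l ++ [x])]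
    rw [PySem.List.dedup_eq_ofList, PySem.Set.ofList_eq_foldl, PySem.Set.update]
    simp [PySem.Dict.keys_empty]
  have hnd : D.keys.Nodup := by
    rw [hkeys]; exact PySem.List.nodup_dedup _
  have hget : ∀ c, D.getD c [] = devices.filter (fun d => devKey d == c) := by
    intro c
    have hpair : D = ((devices.map (fun x => (devKey x, x))).foldl
        (fun d (p : String × List (String × String)) => d.modify p.1 [] (fun l => l ++ [p.2]))
        PySem.Dict.empty) := by
      rw [hD, List.foldl_map]
    rw [hpair, PySem.Dict.getD_foldl_modify_append, PySem.Dict.getD_empty]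
    simp [List.filter_map, Function.comp_def]
  rw [items_eq_keys_map D [] hnd, hkeys]
  exact List.map_congr_left (fun k _ => by rw [hget k])

-- ===== VERDICT (by name: the statement is the Claim_ definition above) =====
theorem get_version_summary_spec : Claim_equal_get_version_summary := by
  intro devices _
  unfold Spec_get_version_summary
  exact main_eq devices
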